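-- pv_equiv track=rewrite | github.com/agga1/AG | lab6/DFS.py | dfs
-- ===== SOURCE A (Python) =====
-- def dfs(adj, s, t, minWeight, vis):
--     vis[s] = 1
--     for neigh in adj[s]:
--         if neigh[1] < minWeight or vis[neigh[0]]:
--             continue
--         if neigh[0] == t:
--             return True
--         if dfs(adj, neigh[0], t, minWeight, vis):
--             return True
--     return False
-- ===== SOURCE B (Python) =====
-- def dfs(adj, s, t, minWeight, vis):
--     vis[s] = 1
--     stack = [iter(adj[s])]
--     while stack:
--         for v, w in stack[-1]:
--             if w < minWeight or vis[v]:
--                 continue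
--             if v == t:
--                 return True
--             vis[v] = 1
--             stack.append(iter(adj[v]))
--             break
--         else:
--             stack.pop()
--     return False
-- ===== Notes on version B (the rewrite author's own statement) =====
-- stated objective: alternative
-- what changed: A's recursive DFS is replaced by an iterative DFS driven by an explicit stack of neighbour-iterator frames (mark on push, pop on exhaustion, early return on hitting t), removing recursion entirely at the same O(V+E) cost; both versions mutate vis identically, and the proved equivalence is about the return value.
-- outside the precondition, e.g. on dfs([[], [(9, 5)]], 0, 1, 0, [0, 0]): A returns False, B returns False; on dfs([[(3, 5)]], 0, 3, 0, [0, 0, 0, 0]): A returns True, B returns True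
import Mathlib
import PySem

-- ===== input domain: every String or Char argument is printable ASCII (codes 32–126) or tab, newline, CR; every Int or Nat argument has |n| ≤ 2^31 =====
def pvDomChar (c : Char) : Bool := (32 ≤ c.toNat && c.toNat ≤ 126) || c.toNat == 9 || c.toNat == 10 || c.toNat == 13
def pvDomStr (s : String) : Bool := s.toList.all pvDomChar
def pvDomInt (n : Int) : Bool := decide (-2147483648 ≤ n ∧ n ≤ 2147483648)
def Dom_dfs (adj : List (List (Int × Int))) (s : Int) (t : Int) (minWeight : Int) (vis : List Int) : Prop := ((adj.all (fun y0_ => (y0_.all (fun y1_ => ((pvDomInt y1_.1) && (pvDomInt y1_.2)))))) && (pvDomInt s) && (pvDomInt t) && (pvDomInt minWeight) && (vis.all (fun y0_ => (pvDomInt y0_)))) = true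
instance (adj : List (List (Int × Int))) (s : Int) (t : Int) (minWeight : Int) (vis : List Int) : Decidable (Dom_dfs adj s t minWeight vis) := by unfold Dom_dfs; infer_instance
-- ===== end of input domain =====

-- B replaces A's recursion by an iterative DFS over an explicit stack of neighbour-iterator frames
-- (same visiting order and marks); equivalence is about the RETURN value only — both Pythons also
-- mutate `vis` in place, in the same way.

-- ===== PORT A =====
-- A is recursive with no structural measure; `fuel` is a totality guard only (each recursive entry
-- marks a fresh zero of vis, so depth ≤ vis.count 0 + 1 and the top-level fuel vis.length + 1 is
-- never exhausted inside Pre_ — lemma simB below is what makes this precise).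
mutual
def dfsGoA (adj : List (List (Int × Int))) (t : Int) (minWeight : Int)
    (fuel : Nat) (s : Int) (vis : List Int) : Bool × List Int :=
  match fuel with
  | 0 => (false, vis)
  | fuel' + 1 =>
      -- vis[s] = 1; for neigh in adj[s]: …
      dfsLoopA adj t minWeight fuel' ((PySem.List.pyGet? adj s).getD [])
        (PySem.List.pySetD vis s 1)
termination_by ((fuel, 0) : Nat × Nat)

def dfsLoopA (adj : List (List (Int × Int))) (t : Int) (minWeight : Int)
    (fuel : Nat) (l : List (Int × Int)) (vis : List Int) : Bool × List Int :=
  match l with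
  | [] => (false, vis)
  | (v, w) :: rest =>
    if w < minWeight then dfsLoopA adj t minWeight fuel rest vis
    else
      match PySem.List.pyGet? vis v with
      | none => (false, vis)   -- Python raises IndexError at vis[neigh[0]]; excluded by Pre_dfs
      | some x =>
        if x ≠ 0 then dfsLoopA adj t minWeight fuel rest vis
        else if v = t then (true, vis)
        else
          match dfsGoA adj t minWeight fuel v vis with
          | (true, vis') => (true, vis')
          | (false, vis') => dfsLoopA adj t minWeight fuel rest vis'
termination_by ((fuel, l.length + 1) : Nat × Nat)
end

def dfs (adj : List (List (Int × Int))) (s : Int) (t : Int) (minWeight : Int) (vis : List Int) : Bool :=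
  (dfsGoA adj t minWeight (vis.length + 1) s vis).1

-- ===== PORT B =====
-- helpers needed by runB's termination measure (pushing a frame erases a zero of vis)
lemma count_set_one_lt (xs : List Int) : ∀ (k : Nat), xs[k]? = some 0 →
    ((xs.set k 1).count 0) < xs.count 0 := by
  induction xs with
  | nil => intro k h; simp at h
  | cons a as ih =>
    intro k h
    cases k with
    | zero =>
      simp at h
      subst h
      simp
    | succ k =>
      simp at h
      simp only [List.set, List.count_cons]
      have := ih k h
      omega

lemma pyMark_count_lt (vis : List Int) (v : Int) (h : PySem.List.pyGet? vis v = some 0) :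
    ((PySem.List.pySetD vis v 1).count 0) < vis.count 0 := by
  simp only [PySem.List.pyGet?] at h
  cases hk : PySem.List.pyIdx? vis.length v with
  | none => rw [hk] at h; simp at h
  | some k =>
    rw [hk] at h
    simp only [Option.bind_some] at h
    simp only [PySem.List.pySetD, PySem.List.pySet?, hk, Option.map_some, Option.getD_some]
    exact count_set_one_lt vis k h

-- the while/for/else loop of B: the stack holds, top first, the not-yet-consumed rest of each
-- frame's neighbour iterator
def runB (adj : List (List (Int × Int))) (t : Int) (minWeight : Int)
    (vis : List Int) (stack : List (List (Int × Int))) : Bool :=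
  match stack with
  | [] => false
  | [] :: stk => runB adj t minWeight vis stk                      -- iterator exhausted: pop
  | ((v, w) :: rest) :: stk =>
    if w < minWeight then runB adj t minWeight vis (rest :: stk)
    else
      match h : PySem.List.pyGet? vis v with
      | none => false   -- Python raises IndexError at vis[neigh[0]]; excluded by Pre_dfs
      | some x =>
        if hx : x ≠ 0 then runB adj t minWeight vis (rest :: stk)
        else if v = t then true
        else runB adj t minWeight (PySem.List.pySetD vis v 1)
               (((PySem.List.pyGet? adj v).getD []) :: rest :: stk)   -- mark, push child frame
termination_by ((vis.count 0, (stack.map (fun l => l.length + 1)).sum) : Nat × Nat)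
decreasing_by
  · apply Prod.Lex.right; simp
  · apply Prod.Lex.right; simp
  · apply Prod.Lex.right; simp
  · apply Prod.Lex.left
    have hx0 : x = 0 := by omega
    subst hx0
    exact pyMark_count_lt vis v h

def dfs_alt (adj : List (List (Int × Int))) (s : Int) (t : Int) (minWeight : Int) (vis : List Int) : Bool :=
  -- vis[s] = 1; stack = [iter(adj[s])]; while stack: …
  runB adj t minWeight (PySem.List.pySetD vis s 1) [((PySem.List.pyGet? adj s).getD [])]

-- ===== PRECONDITION & SPEC =====
-- Pre_ admits inputs where s and every qualifying (weight ≥ minWeight) neighbour entry of every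
-- adjacency list are valid Python indices into adj and vis; this rules out every IndexError but
-- also excludes some inputs on which A returns because the offending entry is never dereferenced
-- (already-visited, equal to t, or in a list the search never enters) — see claim.json cites.
def Pre_dfs (adj : List (List (Int × Int))) (s : Int) (t : Int) (minWeight : Int) (vis : List Int) : Prop :=
  PySem.Raise.InRange adj.length s ∧ PySem.Raise.InRange vis.length s ∧
  ∀ l ∈ adj, ∀ p ∈ l, minWeight ≤ p.2 →
    (PySem.Raise.InRange adj.length p.1 ∧ PySem.Raise.InRange vis.length p.1)
instance (adj : List (List (Int × Int))) (s : Int) (t : Int) (minWeight : Int) (vis : List Int) : Decidable (Pre_dfs adj s t minWeight vis) := by unfold Pre_dfs; infer_instance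

def pvWitness_dfs : (List (List (Int × Int))) × Int × Int × Int × List Int :=
  ([[(1, 5), (0, 2)], []], 0, 1, 3, [0, 0])

def Spec_dfs (adj : List (List (Int × Int))) (s : Int) (t : Int) (minWeight : Int) (vis : List Int) (out : Bool) : Prop := out = dfs_alt adj s t minWeight vis
instance (adj : List (List (Int × Int))) (s : Int) (t : Int) (minWeight : Int) (vis : List Int) (out : Bool) : Decidable (Spec_dfs adj s t minWeight vis out) := by unfold Spec_dfs; infer_instance

-- ===== CLAIM (what is proved, stated in full; the proofs are below) =====
def Claim_equal_dfs : Prop := ∀ (adj : List (List (Int × Int))) (s : Int) (t : Int) (minWeight : Int) (vis : List Int), Dom_dfs adj s t minWeight vis → Pre_dfs adj s t minWeight vis → Spec_dfs adj s t minWeight vis (dfs adj s t minWeight vis)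

-- ===== LEMMAS AND PROOFS =====

lemma count_set_one_le (xs : List Int) : ∀ (k : Nat), ((xs.set k 1).count 0) ≤ xs.count 0 := by
  induction xs with
  | nil => intro k; simp
  | cons a as ih =>
    intro k
    cases k with
    | zero => simp [List.count_cons]
    | succ k => simp only [List.set, List.count_cons]; have := ih k; omega

lemma pyMark_count_le (vis : List Int) (v : Int) :
    ((PySem.List.pySetD vis v 1).count 0) ≤ vis.count 0 := by
  cases hk : PySem.List.pyIdx? vis.length v with
  | none => simp [PySem.List.pySetD, PySem.List.pySet?, hk]
  | some k =>
    simp only [PySem.List.pySetD, PySem.List.pySet?, hk, Option.map_some, Option.getD_some]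
    exact count_set_one_le vis k


-- A's recursion preserves vis's length and never creates zeros
lemma A_invar_loop (adj : List (List (Int × Int))) (t minWeight : Int) (fuel : Nat)
    (hGo : ∀ (s : Int) (vis : List Int),
      (dfsGoA adj t minWeight fuel s vis).2.length = vis.length ∧
      (dfsGoA adj t minWeight fuel s vis).2.count 0 ≤ vis.count 0) :
    ∀ (l : List (Int × Int)) (vis : List Int),
      (dfsLoopA adj t minWeight fuel l vis).2.length = vis.length ∧
      (dfsLoopA adj t minWeight fuel l vis).2.count 0 ≤ vis.count 0 := by
  intro l
  induction l with
  | nil => intro vis; rw [dfsLoopA]; exact ⟨rfl, le_refl _⟩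
  | cons p rest ihl =>
    obtain ⟨v, w⟩ := p
    intro vis
    rw [dfsLoopA]
    by_cases hw : w < minWeight
    · rw [if_pos hw]; exact ihl vis
    · rw [if_neg hw]
      cases hv : PySem.List.pyGet? vis v with
      | none => exact ⟨rfl, le_refl _⟩
      | some x =>
        simp only []
        by_cases hx : x ≠ 0
        · rw [if_pos hx]; exact ihl vis
        · rw [if_neg hx]
          by_cases hvt : v = t
          · rw [if_pos hvt]; exact ⟨rfl, le_refl _⟩
          · rw [if_neg hvt]
            have hG := hGo v vis
            cases hc : dfsGoA adj t minWeight fuel v vis with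
            | mk b vis' =>
              rw [hc] at hG
              cases b
              · have h2 := ihl vis'
                exact ⟨by rw [h2.1, hG.1], le_trans h2.2 hG.2⟩
              · exact hG

lemma A_invar (adj : List (List (Int × Int))) (t minWeight : Int) : ∀ (fuel : Nat),
    (∀ (s : Int) (vis : List Int),
      (dfsGoA adj t minWeight fuel s vis).2.length = vis.length ∧
      (dfsGoA adj t minWeight fuel s vis).2.count 0 ≤ vis.count 0) ∧
    (∀ (l : List (Int × Int)) (vis : List Int),
      (dfsLoopA adj t minWeight fuel l vis).2.length = vis.length ∧
      (dfsLoopA adj t minWeight fuel l vis).2.count 0 ≤ vis.count 0) := by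
  intro fuel
  induction fuel with
  | zero =>
    have hGo : ∀ (s : Int) (vis : List Int),
        (dfsGoA adj t minWeight 0 s vis).2.length = vis.length ∧
        (dfsGoA adj t minWeight 0 s vis).2.count 0 ≤ vis.count 0 := by
      intro s vis; rw [dfsGoA]; exact ⟨rfl, le_refl _⟩
    exact ⟨hGo, A_invar_loop adj t minWeight 0 hGo⟩
  | succ f ih =>
    have hGo : ∀ (s : Int) (vis : List Int),
        (dfsGoA adj t minWeight (f + 1) s vis).2.length = vis.length ∧
        (dfsGoA adj t minWeight (f + 1) s vis).2.count 0 ≤ vis.count 0 := by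
      intro s vis
      rw [dfsGoA]
      have h := ih.2 ((PySem.List.pyGet? adj s).getD []) (PySem.List.pySetD vis s 1)
      exact ⟨by rw [h.1, PySem.List.length_pySetD], le_trans h.2 (pyMark_count_le vis s)⟩
    exact ⟨hGo, A_invar_loop adj t minWeight (f + 1) hGo⟩

-- main simulation: running B's stack machine with frame l on top of stk is: run A's loop on l,
-- then (unless it returned True) continue with the rest of the stack on the updated vis
lemma simB (adj : List (List (Int × Int))) (t minWeight : Int) :
    ∀ (fuel : Nat) (l : List (Int × Int)) (vis : List Int) (stk : List (List (Int × Int))),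
      (∀ p ∈ l, minWeight ≤ p.2 → PySem.Raise.InRange vis.length p.1) →
      (∀ fr ∈ stk, ∀ p ∈ fr, minWeight ≤ p.2 → PySem.Raise.InRange vis.length p.1) →
      (∀ a ∈ adj, ∀ p ∈ a, minWeight ≤ p.2 → PySem.Raise.InRange vis.length p.1) →
      vis.count 0 ≤ fuel →
      runB adj t minWeight vis (l :: stk) =
        (if (dfsLoopA adj t minWeight fuel l vis).1 then true
         else runB adj t minWeight (dfsLoopA adj t minWeight fuel l vis).2 stk) := by
  intro fuel
  induction fuel using Nat.strong_induction_on with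
  | _ fuel ihf =>
  intro l
  induction l with
  | nil =>
    intro vis stk hl hstk hadj hf
    rw [dfsLoopA, runB]
    simp
  | cons p rest ihl =>
    obtain ⟨v, w⟩ := p
    intro vis stk hl hstk hadj hf
    rw [dfsLoopA, runB]
    by_cases hw : w < minWeight
    · rw [if_pos hw, if_pos hw]
      exact ihl vis stk (fun p hp => hl p (List.mem_cons_of_mem _ hp)) hstk hadj hf
    · rw [if_neg hw, if_neg hw]
      have hin : PySem.Raise.InRange vis.length v :=
        hl (v, w) List.mem_cons_self (not_lt.mp hw)
      cases hx : PySem.List.pyGet? vis v with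
      | none =>
        rw [PySem.List.pyGet?_eq_none_iff] at hx
        exact absurd hin hx
      | some x =>
        simp only []
        by_cases hx0 : x ≠ 0
        · rw [if_pos hx0, dif_pos hx0]
          exact ihl vis stk (fun p hp => hl p (List.mem_cons_of_mem _ hp)) hstk hadj hf
        · rw [if_neg hx0, dif_neg hx0]
          rw [not_not] at hx0
          subst hx0
          by_cases hvt : v = t
          · rw [if_pos hvt, if_pos hvt]; simp
          · rw [if_neg hvt, if_neg hvt]
            -- child: v is unvisited, gets marked and its frame pushed
            have hcpos : 0 < vis.count 0 :=
              List.count_pos_iff.mpr (PySem.List.mem_of_pyGet?_eq_some _ hx)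
            obtain ⟨f, rfl⟩ : ∃ f, fuel = f + 1 := ⟨fuel - 1, by omega⟩
            set vis1 := PySem.List.pySetD vis v 1 with hvis1
            set adjv := (PySem.List.pyGet? adj v).getD [] with hadjv
            have hlen1 : vis1.length = vis.length := PySem.List.length_pySetD ..
            have hcnt1 : vis1.count 0 < vis.count 0 := pyMark_count_lt vis v hx
            have hGo : dfsGoA adj t minWeight (f + 1) v vis = dfsLoopA adj t minWeight f adjv vis1 := by
              rw [dfsGoA]
            have hadjv_ok : ∀ p ∈ adjv, minWeight ≤ p.2 → PySem.Raise.InRange vis1.length p.1 := by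
              rw [hlen1]
              intro p hp
              rw [hadjv] at hp
              cases ha : PySem.List.pyGet? adj v with
              | none => rw [ha] at hp; simp at hp
              | some a =>
                rw [ha] at hp
                simp at hp
                exact hadj a (PySem.List.mem_of_pyGet?_eq_some _ ha) p hp
            have hE := ihf f (by omega) adjv vis1 (rest :: stk) hadjv_ok
              (by
                rw [hlen1]
                intro fr hfr
                rcases List.mem_cons.mp hfr with h1 | h2
                · subst h1; exact fun p hp => hl p (List.mem_cons_of_mem _ hp)
                · exact hstk fr h2)
              (by rw [hlen1]; exact hadj)
              (by omega)
            rw [hGo, hE]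
            cases hc : dfsLoopA adj t minWeight f adjv vis1 with
            | mk b vis' =>
              have hInv := A_invar_loop adj t minWeight f ((A_invar adj t minWeight f).1) adjv vis1
              rw [hc] at hInv
              cases b
              · simp only [Bool.false_eq_true, if_false]
                have hlen' : vis'.length = vis.length := by
                  have := hInv.1
                  simp at this
                  rw [this, hlen1]
                have hcnt' : vis'.count 0 ≤ vis1.count 0 := by
                  have := hInv.2
                  simpa using this
                exact ihl vis' stk
                  (by rw [hlen']; exact fun p hp => hl p (List.mem_cons_of_mem _ hp))
                  (by rw [hlen']; exact hstk)
                  (by rw [hlen']; exact hadj)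
                  (by omega)
              · simp

-- ===== VERDICT (by name: the statement is the Claim_ definition above) =====
theorem dfs_spec : Claim_equal_dfs := by
  intro adj s t minWeight vis _hdom hpre
  obtain ⟨hs_adj, hs_vis, hnb⟩ := hpre
  unfold Spec_dfs dfs dfs_alt
  rw [dfsGoA]
  set vis1 := PySem.List.pySetD vis s 1 with hvis1
  set adjs := (PySem.List.pyGet? adj s).getD [] with hadjs
  have hlen1 : vis1.length = vis.length := PySem.List.length_pySetD ..
  have hnb' : ∀ a ∈ adj, ∀ p ∈ a, minWeight ≤ p.2 → PySem.Raise.InRange vis.length p.1 :=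
    fun a ha p hp hwp => (hnb a ha p hp hwp).2
  have hE := simB adj t minWeight vis.length adjs vis1 []
    (by
      rw [hlen1]
      intro p hp
      rw [hadjs] at hp
      cases ha : PySem.List.pyGet? adj s with
      | none => rw [ha] at hp; simp at hp
      | some a =>
        rw [ha] at hp
        simp at hp
        exact hnb' a (PySem.List.mem_of_pyGet?_eq_some _ ha) p hp)
    (by simp)
    (by rw [hlen1]; exact hnb')
    (by
      have h1 : vis1.count 0 ≤ vis1.length := List.count_le_length
      omega)
  rw [hE]
  cases hc : dfsLoopA adj t minWeight vis.length adjs vis1 with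
  | mk b vis' =>
    cases b
    · simp [runB]
    · simp
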